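-- pv_equiv track=rewrite | github.com/ZoreAnuj/dino-locomotion-rl | environments/shared/reporting.py | _compute_fieldnames
-- ===== SOURCE A (Python) =====
-- from typing import Any
--
-- CSV_METRIC_COLUMNS: list[str] = [
--     "best_mean_reward",
--     "best_mean_episode_length",
--     "last_mean_reward",
--     "last_mean_episode_length",
--     "mean_forward_vel",
--     "std_forward_vel",
--     "mean_distance_traveled",
--     "mean_success_rate",
--     "training_duration_seconds",
--     "reward_threshold",
--     "ep_length_threshold",
--     "forward_vel_threshold",
--     "success_rate_threshold",
--     "stage_passed",
--     "quality_score",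
--     "quality_rank",
-- ]
--
-- def _compute_fieldnames(
--     rows: list[dict[str, Any]],
--     fixed_columns: list[str] | None = None,
-- ) -> list[str]:
--     """Derive ordered fieldnames from *rows*.
--
--     Column order: *fixed_columns* → hyperparameter columns (sorted) →
--     ``CSV_METRIC_COLUMNS`` → ``eval_*`` columns (sorted).
--
--     Any key in a row dict that is not in *fixed_columns*,
--     ``CSV_METRIC_COLUMNS``, or prefixed with ``eval_`` is treated as a
--     hyperparameter column.
--     """
--     if fixed_columns is None:
--         fixed_columns = []
--     eval_cols: list[str] = sorted({k for row in rows for k in row if k.startswith("eval_")})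
--     all_known = set(fixed_columns) | set(CSV_METRIC_COLUMNS) | set(eval_cols)
--     hparam_cols: list[str] = sorted({k for row in rows for k in row if k not in all_known})
--     return fixed_columns + hparam_cols + CSV_METRIC_COLUMNS + eval_cols
-- ===== SOURCE B (Python) =====
-- CSV_METRIC_COLUMNS: list[str] = [
--     "best_mean_reward",
--     "best_mean_episode_length",
--     "last_mean_reward",
--     "last_mean_episode_length",
--     "mean_forward_vel",
--     "std_forward_vel",
--     "mean_distance_traveled",
--     "mean_success_rate",
--     "training_duration_seconds",
--     "reward_threshold",
--     "ep_length_threshold",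
--     "forward_vel_threshold",
--     "success_rate_threshold",
--     "stage_passed",
--     "quality_score",
--     "quality_rank",
-- ]
--
--
-- def _compute_fieldnames(rows, fixed_columns=None):
--     # Sort-then-scan: sort ALL keys once (with duplicates), then a single scan of the
--     # sorted stream dedups by comparing with the previous kept key and classifies each
--     # distinct key; the buckets come out already sorted, so no set and no per-bucket sort.
--     fixed = list(fixed_columns) if fixed_columns is not None else []
--     known = set(fixed) | set(CSV_METRIC_COLUMNS)
--     keys = sorted(k for row in rows for k in row)
--     hparam_cols: list[str] = []
--     eval_cols: list[str] = []
--     prev = None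
--     for k in keys:
--         if k == prev:
--             continue
--         prev = k
--         if k.startswith("eval_"):
--             eval_cols.append(k)
--         elif k not in known:
--             hparam_cols.append(k)
--     return fixed + hparam_cols + CSV_METRIC_COLUMNS + eval_cols
-- ===== Notes on version B (the rewrite author's own statement) =====
-- stated objective: alternative
-- what changed: Replaces A's two set-comprehension scans with per-bucket sorts by a sort-then-scan algorithm: sort the full multiset of row keys once, then one scan of the sorted stream that dedups adjacent duplicates via a prev sentinel and classifies each distinct key, so the buckets emerge already sorted with no sets over the row keys and no per-bucket sort.
import Mathlib
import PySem

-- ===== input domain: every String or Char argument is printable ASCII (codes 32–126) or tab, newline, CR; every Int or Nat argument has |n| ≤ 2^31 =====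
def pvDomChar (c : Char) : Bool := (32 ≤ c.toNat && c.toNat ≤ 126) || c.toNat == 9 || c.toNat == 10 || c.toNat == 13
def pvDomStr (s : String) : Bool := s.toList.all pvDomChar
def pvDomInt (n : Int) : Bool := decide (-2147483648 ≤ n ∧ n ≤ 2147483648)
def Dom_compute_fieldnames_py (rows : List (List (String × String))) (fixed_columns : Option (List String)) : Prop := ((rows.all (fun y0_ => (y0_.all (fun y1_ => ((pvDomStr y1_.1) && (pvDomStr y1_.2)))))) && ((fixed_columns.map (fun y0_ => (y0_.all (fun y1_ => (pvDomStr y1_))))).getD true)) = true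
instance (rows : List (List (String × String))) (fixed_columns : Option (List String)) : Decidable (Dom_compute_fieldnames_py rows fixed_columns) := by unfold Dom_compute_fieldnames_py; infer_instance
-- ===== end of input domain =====

-- B replaces A's two set-comprehension scans (each followed by a sort) by sort-then-scan:
-- sort the full multiset of row keys once, then one scan dedups adjacent duplicates via a
-- prev sentinel and classifies each distinct key, so the buckets emerge already sorted (alternative).


def csvMetricColumns : List String :=
  ["best_mean_reward", "best_mean_episode_length", "last_mean_reward",
   "last_mean_episode_length", "mean_forward_vel", "std_forward_vel",
   "mean_distance_traveled", "mean_success_rate", "training_duration_seconds",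
   "reward_threshold", "ep_length_threshold", "forward_vel_threshold",
   "success_rate_threshold", "stage_passed", "quality_score", "quality_rank"]

-- ===== PORT A =====
-- transliteration of A: two set comprehensions over all rows' keys, each sorted
def compute_fieldnames_py (rows : List (List (String × String))) (fixed_columns : Option (List String)) : List String :=
  let fixed := match fixed_columns with | none => [] | some l => l
  let eval_cols : List String :=
    PySem.List.sorted
      (PySem.Set.ofList ((rows.flatMap (fun row => row.map Prod.fst)).filter
        (fun k => PySem.Str.startswith k "eval_")))
      (fun x => x) false
  let all_known : PySem.Set String :=
    PySem.Set.union (PySem.Set.union (PySem.Set.ofList fixed) csvMetricColumns) eval_cols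
  let hparam_cols : List String :=
    PySem.List.sorted
      (PySem.Set.ofList ((rows.flatMap (fun row => row.map Prod.fst)).filter
        (fun k => !(PySem.Set.contains all_known k))))
      (fun x => x) false
  fixed ++ hparam_cols ++ csvMetricColumns ++ eval_cols

-- ===== PORT B =====
-- transliteration of B's loop: scan the sorted key stream, skip a key equal to the previous
-- kept key (prev sentinel, None at start), classify every other key into a bucket
def classifyLoop (known : PySem.Set String) :
    Option String → List String → List String → List String → List String × List String
  | _, hparam, evalc, [] => (hparam, evalc)
  | prev, hparam, evalc, k :: t =>
    if (match prev with | some p => k == p | none => false) then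
      classifyLoop known prev hparam evalc t
    else if PySem.Str.startswith k "eval_" then
      classifyLoop known (some k) hparam (evalc ++ [k]) t
    else if !(PySem.Set.contains known k) then
      classifyLoop known (some k) (hparam ++ [k]) evalc t
    else
      classifyLoop known (some k) hparam evalc t

def compute_fieldnames_py_alt (rows : List (List (String × String))) (fixed_columns : Option (List String)) : List String :=
  let fixed := match fixed_columns with | none => [] | some l => l
  let known : PySem.Set String := PySem.Set.union (PySem.Set.ofList fixed) csvMetricColumns
  let keys : List String :=
    PySem.List.sorted (rows.flatMap (fun row => row.map Prod.fst)) (fun x => x) false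
  let buckets := classifyLoop known none [] [] keys
  fixed ++ buckets.1 ++ csvMetricColumns ++ buckets.2

-- ===== PRECONDITION & SPEC =====
def Spec_compute_fieldnames_py (rows : List (List (String × String))) (fixed_columns : Option (List String)) (out : List String) : Prop := out = compute_fieldnames_py_alt rows fixed_columns
instance (rows : List (List (String × String))) (fixed_columns : Option (List String)) (out : List String) : Decidable (Spec_compute_fieldnames_py rows fixed_columns out) := by unfold Spec_compute_fieldnames_py; infer_instance

-- ===== CLAIM (what is proved, stated in full; the proofs are below) =====
def Claim_equal_compute_fieldnames_py : Prop := ∀ (rows : List (List (String × String))) (fixed_columns : Option (List String)), Dom_compute_fieldnames_py rows fixed_columns → Spec_compute_fieldnames_py rows fixed_columns (compute_fieldnames_py rows fixed_columns)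

-- ===== LEMMAS AND PROOFS =====

-- the adjacent-dedup that B's prev sentinel performs, as a standalone function
def dedupAdj : Option String → List String → List String
  | _, [] => []
  | prev, k :: t =>
    if (match prev with | some p => k == p | none => false) then dedupAdj prev t
    else k :: dedupAdj (some k) t

theorem classifyLoop_cons (known : PySem.Set String) (prev : Option String)
    (h e : List String) (k : String) (t : List String) :
    classifyLoop known prev h e (k :: t) =
      if (match prev with | some p => k == p | none => false) then
        classifyLoop known prev h e t
      else if PySem.Str.startswith k "eval_" then
        classifyLoop known (some k) h (e ++ [k]) t
      else if !(PySem.Set.contains known k) then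
        classifyLoop known (some k) (h ++ [k]) e t
      else
        classifyLoop known (some k) h e t := rfl

theorem dedupAdj_cons (prev : Option String) (k : String) (t : List String) :
    dedupAdj prev (k :: t) =
      if (match prev with | some p => k == p | none => false) then dedupAdj prev t
      else k :: dedupAdj (some k) t := rfl

-- B's loop appends exactly the classifying filters of the adjacent-dedup of its input
theorem classifyLoop_eq (known : PySem.Set String) (prev : Option String)
    (h e l : List String) :
    classifyLoop known prev h e l =
      (h ++ (dedupAdj prev l).filter
          (fun k => !(PySem.Str.startswith k "eval_") && !(PySem.Set.contains known k)),
       e ++ (dedupAdj prev l).filter (fun k => PySem.Str.startswith k "eval_")) := by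
  induction l generalizing prev h e with
  | nil => simp [classifyLoop, dedupAdj]
  | cons k t ih =>
    rw [dedupAdj_cons, classifyLoop_cons]
    by_cases hp : (match prev with | some p => k == p | none => false) = true
    · rw [if_pos hp, if_pos hp, ih]
    · rw [if_neg hp, if_neg hp]
      by_cases hsw : PySem.Str.startswith k "eval_" = true
      · rw [if_pos hsw, ih]
        simp only [List.filter_cons, hsw, Bool.not_true, Bool.false_and]
        simp
      · have hsw' : PySem.Str.startswith k "eval_" = false := by simpa using hsw
        rw [if_neg hsw]
        by_cases hc : PySem.Set.contains known k = true
        · rw [if_neg (by simp only [hc, Bool.not_true]; exact Bool.false_ne_true), ih]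
          simp only [List.filter_cons, hsw', hc, Bool.not_false, Bool.not_true, Bool.true_and]
          simp
        · have hc' : PySem.Set.contains known k = false := by simpa using hc
          rw [if_pos (by simp only [hc', Bool.not_false]), ih]
          simp only [List.filter_cons, hsw', hc', Bool.not_false, Bool.true_and]
          simp

-- over a ≤-sorted tail whose elements all dominate prev = p, the adjacent dedup
-- has the expected membership and is strictly increasing
theorem dedupAdj_some_spec (p : String) (l : List String)
    (hord : l.Pairwise (fun a b => a ≤ b)) (hp : ∀ y ∈ l, p ≤ y) :
    (∀ x, x ∈ dedupAdj (some p) l ↔ (x ∈ l ∧ x ≠ p)) ∧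
      (dedupAdj (some p) l).Pairwise (fun a b => a < b) := by
  induction l generalizing p with
  | nil => simp [dedupAdj]
  | cons k t ih =>
    have hk : p ≤ k := hp k (by simp)
    have ht : ∀ y ∈ t, k ≤ y := fun y hy => (List.pairwise_cons.mp hord).1 y hy
    have htord : t.Pairwise (fun a b => a ≤ b) := (List.pairwise_cons.mp hord).2
    rw [dedupAdj_cons]
    by_cases hkp : (k == p) = true
    · have hkp' : k = p := by simpa using hkp
      rw [if_pos hkp]
      obtain ⟨hm, hpw⟩ := ih p htord (fun y hy => le_trans hk (ht y hy))
      refine ⟨fun x => ?_, hpw⟩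
      rw [hm]
      simp only [List.mem_cons]
      constructor
      · rintro ⟨hx, hxp⟩; exact ⟨Or.inr hx, hxp⟩
      · rintro ⟨hx | hx, hxp⟩
        · exact absurd (hx.trans hkp') hxp
        · exact ⟨hx, hxp⟩
    · have hkp' : k ≠ p := by simpa using hkp
      rw [if_neg (by simpa using hkp')]
      obtain ⟨hm, hpw⟩ := ih k htord ht
      constructor
      · intro x
        simp only [List.mem_cons, hm]
        constructor
        · rintro (rfl | ⟨hx, hxk⟩)
          · exact ⟨Or.inl rfl, hkp'⟩
          · refine ⟨Or.inr hx, fun hxp => ?_⟩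
            subst hxp
            exact hkp' (le_antisymm hk (le_trans (ht x hx) (le_refl x))).symm
        · rintro ⟨rfl | hx, hxp⟩
          · exact Or.inl rfl
          · by_cases hxk : x = k
            · exact Or.inl hxk
            · exact Or.inr ⟨hx, hxk⟩
      · refine List.pairwise_cons.mpr ⟨fun y hy => ?_, hpw⟩
        rw [hm] at hy
        exact lt_of_le_of_ne (ht y hy.1) (fun hh => hy.2 hh.symm)

theorem dedupAdj_none_spec (l : List String) (hord : l.Pairwise (fun a b => a ≤ b)) :
    (∀ x, x ∈ dedupAdj none l ↔ x ∈ l) ∧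
      (dedupAdj none l).Pairwise (fun a b => a < b) := by
  cases l with
  | nil => simp [dedupAdj]
  | cons k t =>
    have ht : ∀ y ∈ t, k ≤ y := fun y hy => (List.pairwise_cons.mp hord).1 y hy
    obtain ⟨hm, hpw⟩ := dedupAdj_some_spec k t (List.pairwise_cons.mp hord).2 ht
    rw [dedupAdj_cons, if_neg (by simp)]
    refine ⟨fun x => ?_, List.pairwise_cons.mpr ⟨fun y hy => ?_, hpw⟩⟩
    · simp only [List.mem_cons, hm]
      constructor
      · rintro (rfl | ⟨hx, _⟩)
        · exact Or.inl rfl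
        · exact Or.inr hx
      · rintro (rfl | hx)
        · exact Or.inl rfl
        · by_cases hxk : x = k
          · exact Or.inl hxk
          · exact Or.inr ⟨hx, hxk⟩
    · rw [hm] at hy
      exact lt_of_le_of_ne (ht y hy.1) (fun hh => hy.2 hh.symm)

-- ===== VERDICT (by name: the statement is the Claim_ definition above) =====
theorem compute_fieldnames_py_spec : Claim_equal_compute_fieldnames_py := by
  unfold Claim_equal_compute_fieldnames_py
  intro rows fixed_columns _
  unfold Spec_compute_fieldnames_py compute_fieldnames_py compute_fieldnames_py_alt
  simp only [classifyLoop_eq]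
  set fixed := match fixed_columns with | none => ([] : List String) | some l => l with hfixed
  set flat := rows.flatMap (fun row => row.map Prod.fst) with hflat
  set S := PySem.List.sorted flat (fun x => x) false with hS
  have hSord : S.Pairwise (fun a b => a ≤ b) := PySem.List.sorted_pairwise flat (fun x => x)
  obtain ⟨hmemD, hDlt⟩ := dedupAdj_none_spec S hSord
  have hmemD' : ∀ x, x ∈ dedupAdj none S ↔ x ∈ flat := by
    intro x; rw [hmemD, hS, PySem.List.mem_sorted]
  set D := dedupAdj none S with hD
  set known : PySem.Set String := PySem.Set.union (PySem.Set.ofList fixed) csvMetricColumns with hknown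
  -- eval buckets agree
  have heval : PySem.List.sorted
      (PySem.Set.ofList (flat.filter (fun k => PySem.Str.startswith k "eval_"))) (fun x => x) false =
      D.filter (fun k => PySem.Str.startswith k "eval_") := by
    apply PySem.List.sorted_eq_of_perm_of_pairwise_lt
    · apply (List.perm_ext_iff_of_nodup (hDlt.filter _).nodup (PySem.Set.nodup_ofList _)).mpr
      intro a
      simp [List.mem_filter, PySem.Set.mem_ofList, hmemD']
    · exact hDlt.filter _
  -- hparam buckets agree
  have hhp : PySem.List.sorted
      (PySem.Set.ofList (flat.filter (fun k =>
        !(PySem.Set.contains (PySem.Set.union known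
          (PySem.List.sorted
            (PySem.Set.ofList (flat.filter (fun k => PySem.Str.startswith k "eval_")))
            (fun x => x) false)) k)))) (fun x => x) false =
      D.filter (fun k => !(PySem.Str.startswith k "eval_") && !(PySem.Set.contains known k)) := by
    apply PySem.List.sorted_eq_of_perm_of_pairwise_lt
    · apply (List.perm_ext_iff_of_nodup (hDlt.filter _).nodup (PySem.Set.nodup_ofList _)).mpr
      intro a
      have hsortmem : a ∈ PySem.List.sorted
          (PySem.Set.ofList (flat.filter (fun k => PySem.Str.startswith k "eval_")))
          (fun x => x) false ↔ a ∈ flat ∧ PySem.Str.startswith a "eval_" = true := by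
        rw [PySem.List.mem_sorted]
        simp [PySem.Set.mem_ofList, List.mem_filter]
      simp only [List.mem_filter, PySem.Set.mem_ofList, hmemD', Bool.and_eq_true,
        Bool.not_eq_eq_eq_not, Bool.not_true, ← Bool.not_eq_true, PySem.Set.contains_iff,
        PySem.Set.mem_union, hsortmem]
      constructor
      · rintro ⟨hf, hsw, hku⟩
        refine ⟨hf, ?_⟩
        rintro (hh | hh)
        · exact hku hh
        · exact hsw hh.2
      · rintro ⟨hf, hk⟩
        refine ⟨hf, ?_, ?_⟩
        · intro hsw; exact hk (Or.inr ⟨hf, hsw⟩)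
        · intro hku; exact hk (Or.inl hku)
    · exact hDlt.filter _
  rw [hhp, heval]
  simp
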